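-- pv_equiv track=rewrite | github.com/reachivy/Shubham-s-code | brainstormer/voice-essay-ai/ai_chat.py | _generate_short_response
-- ===== SOURCE A (Python) =====
-- from typing import Dict, List, Any
--
-- def _generate_short_response(user_message: str, messages: List[Dict],
--                             stage: str, student_name: str) -> str:
--     """Generate short, contextual response"""
--
--     name_part = f" {student_name}" if student_name else ""
--     user_msg_lower = user_message.lower()
--
--     # Template-based short responses
--     if stage == 'greeting':
--         if not student_name:
--             return "Hi! I'm your AI essay coach. What's your name?"
--         else:
--             return f"Great to meet you{name_part}! Tell me about a meaningful challenge or achievement you've experienced."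
--
--     elif stage == 'exploration':
--         # Reference what user mentioned
--         if any(word in user_msg_lower for word in ['challenge', 'difficult', 'hard', 'struggle']):
--             return f"That sounds tough{name_part}. How did you feel when it happened?"
--         elif any(word in user_msg_lower for word in ['success', 'achievement', 'won', 'accomplished']):
--             return f"That's impressive{name_part}! What made this so meaningful to you?"
--         elif any(word in user_msg_lower for word in ['family', 'parent', 'mom', 'dad']):
--             return f"Family experiences can be powerful{name_part}. How did this affect you?"
--         elif any(word in user_msg_lower for word in ['school', 'teacher', 'class']):
--             return f"School experiences shape us{name_part}. What did you learn from this?"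
--         else:
--             return f"That's interesting{name_part}. What made this experience significant for you?"
--
--     elif stage == 'deep_dive':
--         # Emotional follow-up
--         emotions = ['scared', 'nervous', 'excited', 'proud', 'worried', 'happy', 'sad', 'angry']
--         if any(emotion in user_msg_lower for emotion in emotions):
--             return f"I can understand that feeling{name_part}. What did you learn about yourself?"
--         elif any(word in user_msg_lower for word in ['learned', 'realized', 'discovered']):
--             return f"That's a valuable insight{name_part}. How has this changed you?"
--         else:
--             return f"That's really thoughtful{name_part}. How did this experience change your perspective?"
--
--     elif stage == 'synthesis':
--         # Connect to future
--         if any(word in user_msg_lower for word in ['college', 'university', 'study']):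
--             return f"Great connection{name_part}! How will this experience help you in college?"
--         elif any(word in user_msg_lower for word in ['goal', 'dream', 'future']):
--             return f"Those are meaningful goals{name_part}. How does your experience prepare you?"
--         else:
--             return f"That's real growth{name_part}. What are your hopes for college?"
--
--     else:  # conclusion
--         return f"Amazing story{name_part}! You've shared incredible insights. Ready to create your essay?"
-- ===== SOURCE B (Python) =====
-- from typing import Dict, List, Any
--
-- # Flat keyword -> priority map per stage, plus an indexed list of (prefix, suffix)
-- # response templates whose LAST entry is the stage default.  The response chosen is
-- # the one at the MINIMUM priority among all keywords occurring in the message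
-- # (default index if none), computed in one full pass -- no ordered group scan.
-- _STAGES = {
--     'exploration': (
--         {'challenge': 0, 'difficult': 0, 'hard': 0, 'struggle': 0,
--          'success': 1, 'achievement': 1, 'won': 1, 'accomplished': 1,
--          'family': 2, 'parent': 2, 'mom': 2, 'dad': 2,
--          'school': 3, 'teacher': 3, 'class': 3},
--         [("That sounds tough", ". How did you feel when it happened?"),
--          ("That's impressive", "! What made this so meaningful to you?"),
--          ("Family experiences can be powerful", ". How did this affect you?"),
--          ("School experiences shape us", ". What did you learn from this?"),
--          ("That's interesting", ". What made this experience significant for you?")],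
--     ),
--     'deep_dive': (
--         {'scared': 0, 'nervous': 0, 'excited': 0, 'proud': 0,
--          'worried': 0, 'happy': 0, 'sad': 0, 'angry': 0,
--          'learned': 1, 'realized': 1, 'discovered': 1},
--         [("I can understand that feeling", ". What did you learn about yourself?"),
--          ("That's a valuable insight", ". How has this changed you?"),
--          ("That's really thoughtful", ". How did this experience change your perspective?")],
--     ),
--     'synthesis': (
--         {'college': 0, 'university': 0, 'study': 0,
--          'goal': 1, 'dream': 1, 'future': 1},
--         [("Great connection", "! How will this experience help you in college?"),
--          ("Those are meaningful goals", ". How does your experience prepare you?"),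
--          ("That's real growth", ". What are your hopes for college?")],
--     ),
-- }
--
--
-- def _generate_short_response(user_message: str, messages: List[Dict],
--                              stage: str, student_name: str) -> str:
--     name_part = " " + student_name if student_name else ""
--
--     if stage == 'greeting':
--         if not student_name:
--             return "Hi! I'm your AI essay coach. What's your name?"
--         return "Great to meet you" + name_part + "! Tell me about a meaningful challenge or achievement you've experienced."
--
--     entry = _STAGES.get(stage)
--     if entry is None:  # conclusion / unknown stage
--         return "Amazing story" + name_part + "! You've shared incredible insights. Ready to create your essay?"
--
--     priorities, responses = entry
--     low = user_message.lower()
--     best = len(responses) - 1  # default response index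
--     for kw, p in priorities.items():
--         if p < best and kw in low:
--             best = p
--     pre, suf = responses[best]
--     return pre + name_part + suf
-- ===== Notes on version B (the rewrite author's own statement) =====
-- stated objective: alternative
-- what changed: Replaces A's ordered if/elif ladder of short-circuiting any()-group tests with a flat keyword->priority map per stage: one full pass over all keywords computes the minimum matched priority, which indexes a response array (last slot = default); correctness holds because the first matching group in A is exactly the minimum group index among all matched keywords.
import Mathlib
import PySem

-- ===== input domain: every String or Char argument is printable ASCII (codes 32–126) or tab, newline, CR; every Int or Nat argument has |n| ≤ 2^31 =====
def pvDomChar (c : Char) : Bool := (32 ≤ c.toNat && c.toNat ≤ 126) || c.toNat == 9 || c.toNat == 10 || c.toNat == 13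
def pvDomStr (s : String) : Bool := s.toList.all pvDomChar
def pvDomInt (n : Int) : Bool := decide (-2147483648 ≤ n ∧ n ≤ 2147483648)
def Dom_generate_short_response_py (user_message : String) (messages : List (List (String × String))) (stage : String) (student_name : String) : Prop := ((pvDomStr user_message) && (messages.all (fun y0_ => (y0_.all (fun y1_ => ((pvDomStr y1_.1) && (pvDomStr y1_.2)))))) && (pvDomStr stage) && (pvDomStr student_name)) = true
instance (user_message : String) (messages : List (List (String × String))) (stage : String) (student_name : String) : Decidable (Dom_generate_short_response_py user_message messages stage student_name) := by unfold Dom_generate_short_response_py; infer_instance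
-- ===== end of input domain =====

-- B replaces A's ordered short-circuiting any()-group ladder by a flat keyword->priority
-- map scanned once in full, taking the minimum matched priority into a response array
-- (objective: alternative; same cost).


-- ===== PORT A =====
def generate_short_response_py (user_message : String) (messages : List (List (String × String))) (stage : String) (student_name : String) : String :=
  let name_part := if student_name ≠ "" then " " ++ student_name else ""
  let user_msg_lower := PySem.Str.lower user_message
  if stage == "greeting" then
    if student_name == "" then "Hi! I'm your AI essay coach. What's your name?"
    else "Great to meet you" ++ name_part ++ "! Tell me about a meaningful challenge or achievement you've experienced."
  else if stage == "exploration" then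
    if ["challenge", "difficult", "hard", "struggle"].any (fun word => PySem.Str.isIn word user_msg_lower) then
      "That sounds tough" ++ name_part ++ ". How did you feel when it happened?"
    else if ["success", "achievement", "won", "accomplished"].any (fun word => PySem.Str.isIn word user_msg_lower) then
      "That's impressive" ++ name_part ++ "! What made this so meaningful to you?"
    else if ["family", "parent", "mom", "dad"].any (fun word => PySem.Str.isIn word user_msg_lower) then
      "Family experiences can be powerful" ++ name_part ++ ". How did this affect you?"
    else if ["school", "teacher", "class"].any (fun word => PySem.Str.isIn word user_msg_lower) then
      "School experiences shape us" ++ name_part ++ ". What did you learn from this?"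
    else
      "That's interesting" ++ name_part ++ ". What made this experience significant for you?"
  else if stage == "deep_dive" then
    let emotions := ["scared", "nervous", "excited", "proud", "worried", "happy", "sad", "angry"]
    if emotions.any (fun emotion => PySem.Str.isIn emotion user_msg_lower) then
      "I can understand that feeling" ++ name_part ++ ". What did you learn about yourself?"
    else if ["learned", "realized", "discovered"].any (fun word => PySem.Str.isIn word user_msg_lower) then
      "That's a valuable insight" ++ name_part ++ ". How has this changed you?"
    else
      "That's really thoughtful" ++ name_part ++ ". How did this experience change your perspective?"
  else if stage == "synthesis" then
    if ["college", "university", "study"].any (fun word => PySem.Str.isIn word user_msg_lower) then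
      "Great connection" ++ name_part ++ "! How will this experience help you in college?"
    else if ["goal", "dream", "future"].any (fun word => PySem.Str.isIn word user_msg_lower) then
      "Those are meaningful goals" ++ name_part ++ ". How does your experience prepare you?"
    else
      "That's real growth" ++ name_part ++ ". What are your hopes for college?"
  else
    "Amazing story" ++ name_part ++ "! You've shared incredible insights. Ready to create your essay?"

-- ===== PORT B =====
-- flat keyword -> priority map and indexed response list (last = default), per stage
def pvStageTable : PySem.Dict String (List (String × Nat) × List (String × String)) :=
  PySem.Dict.mk
    [("exploration",
      ([("challenge", 0), ("difficult", 0), ("hard", 0), ("struggle", 0),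
        ("success", 1), ("achievement", 1), ("won", 1), ("accomplished", 1),
        ("family", 2), ("parent", 2), ("mom", 2), ("dad", 2),
        ("school", 3), ("teacher", 3), ("class", 3)],
       [("That sounds tough", ". How did you feel when it happened?"),
        ("That's impressive", "! What made this so meaningful to you?"),
        ("Family experiences can be powerful", ". How did this affect you?"),
        ("School experiences shape us", ". What did you learn from this?"),
        ("That's interesting", ". What made this experience significant for you?")])),
     ("deep_dive",
      ([("scared", 0), ("nervous", 0), ("excited", 0), ("proud", 0),
        ("worried", 0), ("happy", 0), ("sad", 0), ("angry", 0),
        ("learned", 1), ("realized", 1), ("discovered", 1)],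
       [("I can understand that feeling", ". What did you learn about yourself?"),
        ("That's a valuable insight", ". How has this changed you?"),
        ("That's really thoughtful", ". How did this experience change your perspective?")])),
     ("synthesis",
      ([("college", 0), ("university", 0), ("study", 0),
        ("goal", 1), ("dream", 1), ("future", 1)],
       [("Great connection", "! How will this experience help you in college?"),
        ("Those are meaningful goals", ". How does your experience prepare you?"),
        ("That's real growth", ". What are your hopes for college?")]))]

-- B's loop: full pass over the flat keyword map keeping the minimum matched priority
def pvBestLoop (prios : List (String × Nat)) (low : String) (best : Nat) : Nat :=
  match prios with
  | [] => best
  | (kw, p) :: rest =>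
      pvBestLoop rest low (if p < best && PySem.Str.isIn kw low then p else best)

def generate_short_response_py_alt (user_message : String) (messages : List (List (String × String))) (stage : String) (student_name : String) : String :=
  let name_part := if student_name ≠ "" then " " ++ student_name else ""
  if stage == "greeting" then
    if student_name == "" then "Hi! I'm your AI essay coach. What's your name?"
    else "Great to meet you" ++ name_part ++ "! Tell me about a meaningful challenge or achievement you've experienced."
  else
    match pvStageTable.get? stage with
    | none => "Amazing story" ++ name_part ++ "! You've shared incredible insights. Ready to create your essay?"
    | some (priorities, responses) =>
      let low := PySem.Str.lower user_message
      let best := pvBestLoop priorities low (responses.length - 1)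
      let t := responses.getD best ("", "")
      t.1 ++ name_part ++ t.2

-- ===== PRECONDITION & SPEC =====
def Spec_generate_short_response_py (user_message : String) (messages : List (List (String × String))) (stage : String) (student_name : String) (out : String) : Prop := out = generate_short_response_py_alt user_message messages stage student_name
instance (user_message : String) (messages : List (List (String × String))) (stage : String) (student_name : String) (out : String) : Decidable (Spec_generate_short_response_py user_message messages stage student_name out) := by unfold Spec_generate_short_response_py; infer_instance

-- ===== CLAIM (what is proved, stated in full; the proofs are below) =====
def Claim_equal_generate_short_response_py : Prop := ∀ (user_message : String) (messages : List (List (String × String))) (stage : String) (student_name : String), Dom_generate_short_response_py user_message messages stage student_name → Spec_generate_short_response_py user_message messages stage student_name (generate_short_response_py user_message messages stage student_name)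

-- ===== LEMMAS AND PROOFS =====

theorem pvBestLoop_append (l1 l2 : List (String × Nat)) (low : String) (b : Nat) :
    pvBestLoop (l1 ++ l2) low b = pvBestLoop l2 low (pvBestLoop l1 low b) := by
  induction l1 generalizing b with
  | nil => rfl
  | cons hd tl ih => cases hd; simp [pvBestLoop, ih]

-- a group whose priority is ≥ the accumulator never changes it
theorem pvBestLoop_map_ge (kws : List String) (p b : Nat) (low : String) (h : b ≤ p) :
    pvBestLoop (kws.map (fun k => (k, p))) low b = b := by
  induction kws with
  | nil => rfl
  | cons k ks ih =>
    have hlt : ¬ p < b := by omega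
    simp [pvBestLoop, hlt, ih]

-- a group whose priority is < the accumulator yields its priority iff any keyword matches
theorem pvBestLoop_map_group (kws : List String) (p b : Nat) (low : String) (h : p < b) :
    pvBestLoop (kws.map (fun k => (k, p))) low b
      = if kws.any (fun k => PySem.Str.isIn k low) then p else b := by
  induction kws with
  | nil => simp [pvBestLoop]
  | cons k ks ih =>
    by_cases hk : PySem.Chars.isIn k.toList low.toList = true
    · simp [pvBestLoop, PySem.Str.isIn, h, hk, pvBestLoop_map_ge ks p p low (le_refl p)]
    · simp [pvBestLoop, PySem.Str.isIn, hk, ih]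

-- per-stage evaluation of B's min-priority pass as a branch cascade
theorem pvBest_expl (low : String) :
    pvBestLoop
      [("challenge", 0), ("difficult", 0), ("hard", 0), ("struggle", 0),
       ("success", 1), ("achievement", 1), ("won", 1), ("accomplished", 1),
       ("family", 2), ("parent", 2), ("mom", 2), ("dad", 2),
       ("school", 3), ("teacher", 3), ("class", 3)] low 4
    = (if (["challenge", "difficult", "hard", "struggle"].any (fun k => PySem.Str.isIn k low)) = true then 0
       else if (["success", "achievement", "won", "accomplished"].any (fun k => PySem.Str.isIn k low)) = true then 1
       else if (["family", "parent", "mom", "dad"].any (fun k => PySem.Str.isIn k low)) = true then 2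
       else if (["school", "teacher", "class"].any (fun k => PySem.Str.isIn k low)) = true then 3
       else 4) := by
  rw [show ([("challenge", 0), ("difficult", 0), ("hard", 0), ("struggle", 0),
        ("success", 1), ("achievement", 1), ("won", 1), ("accomplished", 1),
        ("family", 2), ("parent", 2), ("mom", 2), ("dad", 2),
        ("school", 3), ("teacher", 3), ("class", 3)] : List (String × Nat))
      = (["challenge", "difficult", "hard", "struggle"].map (fun k => (k, 0)))
        ++ (["success", "achievement", "won", "accomplished"].map (fun k => (k, 1)))
        ++ (["family", "parent", "mom", "dad"].map (fun k => (k, 2)))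
        ++ (["school", "teacher", "class"].map (fun k => (k, 3))) from rfl]
  rw [pvBestLoop_append, pvBestLoop_append, pvBestLoop_append,
      pvBestLoop_map_group _ 0 4 low (by omega)]
  by_cases h0 : (["challenge", "difficult", "hard", "struggle"].any (fun k => PySem.Str.isIn k low)) = true
  · rw [if_pos h0, pvBestLoop_map_ge _ 1 0 low (by omega),
        pvBestLoop_map_ge _ 2 0 low (by omega), pvBestLoop_map_ge _ 3 0 low (by omega), if_pos h0]
  · rw [if_neg h0, pvBestLoop_map_group _ 1 4 low (by omega), if_neg h0]
    by_cases h1 : (["success", "achievement", "won", "accomplished"].any (fun k => PySem.Str.isIn k low)) = true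
    · rw [if_pos h1, pvBestLoop_map_ge _ 2 1 low (by omega),
          pvBestLoop_map_ge _ 3 1 low (by omega), if_pos h1]
    · rw [if_neg h1, pvBestLoop_map_group _ 2 4 low (by omega), if_neg h1]
      by_cases h2 : (["family", "parent", "mom", "dad"].any (fun k => PySem.Str.isIn k low)) = true
      · rw [if_pos h2, pvBestLoop_map_ge _ 3 2 low (by omega), if_pos h2]
      · rw [if_neg h2, pvBestLoop_map_group _ 3 4 low (by omega), if_neg h2]

theorem pvBest_deep (low : String) :
    pvBestLoop
      [("scared", 0), ("nervous", 0), ("excited", 0), ("proud", 0),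
       ("worried", 0), ("happy", 0), ("sad", 0), ("angry", 0),
       ("learned", 1), ("realized", 1), ("discovered", 1)] low 2
    = (if (["scared", "nervous", "excited", "proud", "worried", "happy", "sad", "angry"].any (fun k => PySem.Str.isIn k low)) = true then 0
       else if (["learned", "realized", "discovered"].any (fun k => PySem.Str.isIn k low)) = true then 1
       else 2) := by
  rw [show ([("scared", 0), ("nervous", 0), ("excited", 0), ("proud", 0),
        ("worried", 0), ("happy", 0), ("sad", 0), ("angry", 0),
        ("learned", 1), ("realized", 1), ("discovered", 1)] : List (String × Nat))
      = (["scared", "nervous", "excited", "proud", "worried", "happy", "sad", "angry"].map (fun k => (k, 0)))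
        ++ (["learned", "realized", "discovered"].map (fun k => (k, 1))) from rfl]
  rw [pvBestLoop_append, pvBestLoop_map_group _ 0 2 low (by omega)]
  by_cases h0 : (["scared", "nervous", "excited", "proud", "worried", "happy", "sad", "angry"].any (fun k => PySem.Str.isIn k low)) = true
  · rw [if_pos h0, pvBestLoop_map_ge _ 1 0 low (by omega), if_pos h0]
  · rw [if_neg h0, pvBestLoop_map_group _ 1 2 low (by omega), if_neg h0]

theorem pvBest_synth (low : String) :
    pvBestLoop
      [("college", 0), ("university", 0), ("study", 0),
       ("goal", 1), ("dream", 1), ("future", 1)] low 2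
    = (if (["college", "university", "study"].any (fun k => PySem.Str.isIn k low)) = true then 0
       else if (["goal", "dream", "future"].any (fun k => PySem.Str.isIn k low)) = true then 1
       else 2) := by
  rw [show ([("college", 0), ("university", 0), ("study", 0),
        ("goal", 1), ("dream", 1), ("future", 1)] : List (String × Nat))
      = (["college", "university", "study"].map (fun k => (k, 0)))
        ++ (["goal", "dream", "future"].map (fun k => (k, 1))) from rfl]
  rw [pvBestLoop_append, pvBestLoop_map_group _ 0 2 low (by omega)]
  by_cases h0 : (["college", "university", "study"].any (fun k => PySem.Str.isIn k low)) = true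
  · rw [if_pos h0, pvBestLoop_map_ge _ 1 0 low (by omega), if_pos h0]
  · rw [if_neg h0, pvBestLoop_map_group _ 1 2 low (by omega), if_neg h0]

-- ===== VERDICT (by name: the statement is the Claim_ definition above) =====
set_option maxHeartbeats 2000000 in
set_option maxRecDepth 20000 in
theorem generate_short_response_py_spec : Claim_equal_generate_short_response_py := by
  intro user_message messages stage student_name _
  unfold Spec_generate_short_response_py generate_short_response_py generate_short_response_py_alt
  by_cases hg : stage = "greeting"
  · subst hg; rfl
  · by_cases he : stage = "exploration"
    · subst he
      simp only [pvStageTable, PySem.Dict.get?]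
      simp [List.find?, pvBest_expl]
      split_ifs <;> rfl
    · by_cases hd : stage = "deep_dive"
      · subst hd
        simp only [pvStageTable, PySem.Dict.get?]
        simp [List.find?, pvBest_deep]
        split_ifs <;> rfl
      · by_cases hs : stage = "synthesis"
        · subst hs
          simp only [pvStageTable, PySem.Dict.get?]
          simp [List.find?, pvBest_synth]
          split_ifs <;> rfl
        · have h1 : ("exploration" == stage) = false := by simp [Ne.symm he]
          have h2 : ("deep_dive" == stage) = false := by simp [Ne.symm hd]
          have h3 : ("synthesis" == stage) = false := by simp [Ne.symm hs]
          simp [pvStageTable, PySem.Dict.get?, List.find?, h1, h2, h3, hg, he, hd, hs]
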